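-- pv_equiv track=rewrite | github.com/ngroegli/askai-cli | src/askai/infrastructure/output/file_writers/css_writer.py | _clean_css_content
-- ===== SOURCE A (Python) =====
-- def _clean_css_content(content: str) -> str:
--     """Clean CSS content of common formatting issues.
--
--     Args:
--         content: CSS content to clean
--
--     Returns:
--         str: Cleaned CSS content
--     """
--     lines = content.split('\n')
--     fixed_lines = []
--
--     # CSS selectors that commonly follow 'n' when incorrectly processed
--     css_selectors = [
--         'html', 'body', 'div', 'span', 'a', 'p', 'ul', 'ol', 'li',
--         'header', 'footer', 'nav', 'section', 'article', 'aside',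
--         'main', 'form', 'input', 'button', 'img', 'table', 'tr', 'td', 'th'
--     ]
--
--     for line in lines:
--         stripped_line = line.strip()
--
--         # Check for 'n' followed by space
--         if stripped_line.startswith('n '):
--             fixed_lines.append(line[line.find('n')+1:])
--         # Check for 'n' followed by CSS selector
--         elif stripped_line.startswith('n'):
--             found_selector = False
--             for selector in css_selectors:
--                 if stripped_line.startswith('n' + selector) and (
--                     len(stripped_line) == len('n' + selector) or
--                     stripped_line[len('n' + selector)] in [' ', '{', '.', '#', ':', '[']
--                 ):
--                     # It's likely a CSS selector - remove the 'n'
--                     fixed_lines.append(line[line.find('n')+1:])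
--                     found_selector = True
--                     break
--
--             if not found_selector:
--                 # No CSS selector match, keep the line as is
--                 fixed_lines.append(line)
--         else:
--             fixed_lines.append(line)
--
--     return '\n'.join(fixed_lines)
-- ===== SOURCE B (Python) =====
-- _CSS_SELECTORS = ('html body div span a p ul ol li header footer nav '
--                   'section article aside main form input button img table tr td th').split()
-- _SELECTOR_SET = frozenset(_CSS_SELECTORS)
-- _BOUNDARY = frozenset(' {.#:[')
--
--
-- def _fix_line(line):
--     """Return the line with a stray leading 'n' removed, or the line unchanged."""
--     s = line.strip()
--     if not s.startswith('n'):
--         return line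
--     rest = s[1:]
--     token = rest
--     for i, ch in enumerate(rest):
--         if ch in _BOUNDARY:
--             token = rest[:i]
--             break
--     if rest.startswith(' ') or token in _SELECTOR_SET:
--         return line[line.find('n') + 1:]
--     return line
--
--
-- def _clean_css_content(content: str) -> str:
--     """Clean CSS content of common formatting issues (per-line fixer, set lookup)."""
--     return '\n'.join(map(_fix_line, content.split('\n')))
-- ===== Notes on version B (the rewrite author's own statement) =====
-- stated objective: simpler
-- what changed: A single per-line fixer with one unified condition replaces A's if/elif chain: the inner per-selector prefix-matching loop is gone, replaced by extracting the token up to the first boundary character once and testing it (or a leading space) against a precomputed frozenset of selectors.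
import Mathlib
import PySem

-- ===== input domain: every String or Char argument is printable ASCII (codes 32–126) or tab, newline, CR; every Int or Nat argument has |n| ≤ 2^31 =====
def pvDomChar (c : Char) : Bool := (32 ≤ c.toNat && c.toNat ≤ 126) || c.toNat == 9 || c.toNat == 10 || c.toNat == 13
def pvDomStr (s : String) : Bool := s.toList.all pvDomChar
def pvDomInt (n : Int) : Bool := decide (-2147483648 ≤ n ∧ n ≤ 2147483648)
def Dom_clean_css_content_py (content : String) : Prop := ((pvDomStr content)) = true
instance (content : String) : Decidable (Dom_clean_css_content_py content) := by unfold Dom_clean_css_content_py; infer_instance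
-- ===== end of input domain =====

-- B collapses A's if/elif chain and inner per-selector loop into one per-line fixer:
-- extract the token before the first boundary character and test it (or a leading
-- space) against a selector set in a single unified condition (objective: simpler).

-- ===== PORT A =====
def pvCssSelectorsA : List (List Char) :=
  ["html".toList, "body".toList, "div".toList, "span".toList, "a".toList, "p".toList,
   "ul".toList, "ol".toList, "li".toList, "header".toList, "footer".toList, "nav".toList,
   "section".toList, "article".toList, "aside".toList, "main".toList, "form".toList,
   "input".toList, "button".toList, "img".toList, "table".toList, "tr".toList,
   "td".toList, "th".toList]

-- the inner 'for selector in css_selectors: … break' loop of A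
def pvSelLoopA (line stripped : List Char) : List (List Char) → List Char
  | [] => line
  | sel :: more =>
    if PySem.Chars.startswith stripped ('n' :: sel) &&
       (stripped.length == ('n' :: sel).length ||
        (match PySem.List.pyGet? stripped ((('n' :: sel).length : Nat) : Int) with
         | some c => [' ', '{', '.', '#', ':', '['].contains c
         | none => false)) then
      PySem.List.slice line (some (PySem.Chars.find line ['n'] + 1)) none
    else pvSelLoopA line stripped more

def pvCleanLineA (line : List Char) : List Char :=
  let stripped := PySem.Chars.strip line
  if PySem.Chars.startswith stripped ['n', ' '] then
    PySem.List.slice line (some (PySem.Chars.find line ['n'] + 1)) none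
  else if PySem.Chars.startswith stripped ['n'] then
    pvSelLoopA line stripped pvCssSelectorsA
  else line

def clean_css_content_py (content : String) : String :=
  String.ofList (PySem.Chars.join ['\n']
    ((PySem.Chars.splitOn content.toList ['\n']).foldl (fun acc l => acc ++ [pvCleanLineA l]) []))

-- ===== PORT B =====
-- frozenset built from a space-separated string, as in Source B
def pvSelectorSetB : PySem.Set (List Char) :=
  PySem.Set.ofList (PySem.Chars.split₀
    ("html body div span a p ul ol li header footer nav " ++
     "section article aside main form input button img table tr td th").toList)

def pvBoundB : List Char := [' ', '{', '.', '#', ':', '[']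

-- Source B's 'for i, ch in enumerate(rest): if ch in _BOUNDARY: token = rest[:i]; break'
def pvTokenB : List Char → List Char
  | [] => []
  | c :: cs => if pvBoundB.contains c then [] else c :: pvTokenB cs

def pvFixLineB (line : List Char) : List Char :=
  let s := PySem.Chars.strip line
  if !PySem.Chars.startswith s ['n'] then line
  else
    let rest := PySem.List.slice s (some 1) none
    if PySem.Chars.startswith rest [' '] || PySem.Set.contains pvSelectorSetB (pvTokenB rest) then
      PySem.List.slice line (some (PySem.Chars.find line ['n'] + 1)) none
    else line

def clean_css_content_py_alt (content : String) : String :=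
  String.ofList (PySem.Chars.join ['\n']
    ((PySem.Chars.splitOn content.toList ['\n']).map pvFixLineB))

-- ===== PRECONDITION & SPEC =====
def Spec_clean_css_content_py (content : String) (out : String) : Prop := out = clean_css_content_py_alt content
instance (content : String) (out : String) : Decidable (Spec_clean_css_content_py content out) := by unfold Spec_clean_css_content_py; infer_instance

-- ===== CLAIM (what is proved, stated in full; the proofs are below) =====
def Claim_equal_clean_css_content_py : Prop := ∀ (content : String), Dom_clean_css_content_py content → Spec_clean_css_content_py content (clean_css_content_py content)

-- ===== LEMMAS AND PROOFS =====

lemma pvTokenB_eq_takeWhile (l : List Char) :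
    pvTokenB l = l.takeWhile (fun c => !pvBoundB.contains c) := by
  induction l with
  | nil => rfl
  | cons c cs ih =>
    rw [pvTokenB]
    by_cases h : pvBoundB.contains c = true
    · rw [if_pos h, List.takeWhile_cons_of_neg (by simpa using h)]
    · rw [if_neg h, List.takeWhile_cons_of_pos (by simpa using h), ih]

-- A's per-selector test holds iff the selector equals B's extracted token
lemma pvMatch_iff_token (sel rest : List Char)
    (hsel : sel.all (fun c => !pvBoundB.contains c) = true) :
    (PySem.Chars.startswith ('n' :: rest) ('n' :: sel) &&
       (('n' :: rest).length == ('n' :: sel).length ||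
        (match PySem.List.pyGet? ('n' :: rest) ((('n' :: sel).length : Nat) : Int) with
         | some c => [' ', '{', '.', '#', ':', '['].contains c
         | none => false))) = true ↔
    rest.takeWhile (fun c => !pvBoundB.contains c) = sel := by
  have hps : List.takeWhile (fun c => !pvBoundB.contains c) sel = sel :=
    List.takeWhile_eq_self_iff.mpr (List.all_eq_true.mp hsel)
  rw [Bool.and_eq_true, PySem.Chars.startswith_iff, List.cons_prefix_cons,
    Bool.or_eq_true, beq_iff_eq]
  have hget : PySem.List.pyGet? ('n' :: rest) ((('n' :: sel).length : Nat) : Int)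
      = rest[sel.length]? := by
    rw [PySem.List.pyGet?_natCast]
    simp
  rw [hget]
  constructor
  · rintro ⟨⟨-, hpre⟩, hcond⟩
    obtain ⟨t, rfl⟩ := hpre
    rcases hcond with hlen | hbnd
    · have ht : t = [] := by
        simp only [List.length_cons, List.length_append] at hlen
        exact List.eq_nil_of_length_eq_zero (by omega)
      subst ht
      simpa using hps
    · cases t with
      | nil => simp at hbnd
      | cons c t' =>
        have hc : (sel ++ c :: t')[sel.length]? = some c := by simp
        rw [hc] at hbnd
        have hbnd' : pvBoundB.contains c = true := hbnd
        rw [List.takeWhile_append, if_pos (by rw [hps]),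
          List.takeWhile_cons_of_neg (by exact fun h => (by simpa using h : c ∉ pvBoundB) (by simpa using hbnd')), List.append_nil]
  · intro htok
    have hsplit : rest = sel ++ rest.dropWhile (fun c => !pvBoundB.contains c) := by
      conv_lhs => rw [← List.takeWhile_append_dropWhile
        (p := fun c => !pvBoundB.contains c) (l := rest)]
      rw [htok]
    refine ⟨⟨rfl, ⟨_, hsplit.symm⟩⟩, ?_⟩
    cases hd : rest.dropWhile (fun c => !pvBoundB.contains c) with
    | nil => left; rw [hsplit, hd]; simp
    | cons c t' =>
      right
      have hc : rest[sel.length]? = some c := by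
        conv_lhs => rw [hsplit, hd]
        simp
      rw [hc]
      have hhd := List.head?_dropWhile_not (fun c => !pvBoundB.contains c) rest
      rw [hd] at hhd
      have hpc : (!pvBoundB.contains c) = false := by simpa using hhd
      show ([' ', '{', '.', '#', ':', '['].contains c) = true
      have hmem : c ∈ pvBoundB := by simpa using hpc
      simpa [pvBoundB] using hmem

-- the selector loop returns the de-'n'-ed line iff the token is one of the selectors
lemma pvSelLoopA_eq (line rest : List Char) (L : List (List Char))
    (hall : ∀ sel ∈ L, sel.all (fun c => !pvBoundB.contains c) = true) :
    pvSelLoopA line ('n' :: rest) L =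
      (if (rest.takeWhile (fun c => !pvBoundB.contains c)) ∈ L then
        PySem.List.slice line (some (PySem.Chars.find line ['n'] + 1)) none
      else line) := by
  induction L with
  | nil => simp [pvSelLoopA]
  | cons sel more ih =>
    rw [pvSelLoopA]
    by_cases h : rest.takeWhile (fun c => !pvBoundB.contains c) = sel
    · rw [if_pos ((pvMatch_iff_token sel rest (hall sel (by simp))).mpr h),
        if_pos (by rw [h]; exact List.mem_cons_self)]
    · rw [if_neg (by
        intro hc
        exact h ((pvMatch_iff_token sel rest (hall sel (by simp))).mp hc)),
        ih (fun s hs => hall s (by simp [hs]))]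
      split_ifs with h1 h2 h3
      · rfl
      · exact absurd (List.mem_cons_of_mem _ h1) h2
      · rcases List.mem_cons.mp h3 with h4 | h4
        · exact absurd h4 h
        · exact absurd h4 h1
      · rfl

-- B's frozenset is built from the same selectors as A's list
lemma pvSelSetB_eq : pvSelectorSetB = PySem.Set.ofList pvCssSelectorsA := by decide

lemma pvLine_eq (line : List Char) : pvCleanLineA line = pvFixLineB line := by
  unfold pvCleanLineA pvFixLineB
  by_cases h2 : PySem.Chars.startswith (PySem.Chars.strip line) ['n'] = true
  · obtain ⟨t, ht⟩ := (PySem.Chars.startswith_iff (PySem.Chars.strip line) ['n']).mp h2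
    obtain ⟨rest, hrest⟩ : ∃ r, PySem.Chars.strip line = 'n' :: r := ⟨t, by simpa using ht.symm⟩
    rw [hrest]
    simp only [Bool.not_true, Bool.false_eq_true, if_false,
      (by rw [← hrest]; exact h2 : PySem.Chars.startswith ('n' :: rest) ['n'] = true)]
    have hslice : PySem.List.slice ('n' :: rest) (some 1) none = rest := by
      rw [PySem.List.slice_from_one]; rfl
    rw [hslice, pvSelLoopA_eq line rest pvCssSelectorsA (by decide),
      pvTokenB_eq_takeWhile, pvSelSetB_eq]
    by_cases hsp : PySem.Chars.startswith ('n' :: rest) ['n', ' '] = true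
    · obtain ⟨u, hu⟩ := (PySem.Chars.startswith_iff ('n' :: rest) ['n', ' ']).mp hsp
      have hr : rest = ' ' :: u := by simpa using hu.symm
      rw [if_pos hsp, if_pos (by
        rw [Bool.or_eq_true]; left
        rw [hr, PySem.Chars.startswith_iff]
        exact ⟨u, rfl⟩)]
    · rw [if_neg hsp]
      have hrsp : PySem.Chars.startswith rest [' '] = false := by
        rw [Bool.eq_false_iff]
        intro hc
        obtain ⟨u, hu⟩ := (PySem.Chars.startswith_iff rest [' ']).mp hc
        exact hsp ((PySem.Chars.startswith_iff ('n' :: rest) ['n', ' ']).mpr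
          ⟨u, by rw [← hu]; rfl⟩)
      rw [hrsp, Bool.false_or]
      have hci : ∀ x : List Char, (PySem.Set.ofList pvCssSelectorsA).contains x = true ↔ x ∈ pvCssSelectorsA :=
        fun x => (PySem.Set.contains_iff _ _).trans (PySem.Set.mem_ofList _ _)
      by_cases hmem : rest.takeWhile (fun c => !pvBoundB.contains c) ∈ pvCssSelectorsA
      · rw [if_pos hmem, if_pos ((hci _).mpr hmem)]; simp
      · rw [if_neg hmem, if_neg (fun hc => hmem ((hci _).mp hc))]; simp
  · have h1 : PySem.Chars.startswith (PySem.Chars.strip line) ['n', ' '] = false := by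
      rw [Bool.eq_false_iff]
      intro hc
      obtain ⟨u, hu⟩ := (PySem.Chars.startswith_iff _ ['n', ' ']).mp hc
      exact h2 ((PySem.Chars.startswith_iff _ ['n']).mpr ⟨' ' :: u, by rw [← hu]; rfl⟩)
    simp [h1, Bool.eq_false_iff.mpr h2]

-- ===== VERDICT (by name: the statement is the Claim_ definition above) =====
theorem clean_css_content_py_spec : Claim_equal_clean_css_content_py := by
  intro content _
  unfold Spec_clean_css_content_py clean_css_content_py clean_css_content_py_alt
  rw [PySem.List.foldl_append_singleton_eq_map]
  simp only [List.nil_append]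
  congr 2
  exact List.map_congr_left (fun l _ => pvLine_eq l)
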